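-- pv_equiv track=rewrite | github.com/auggiemarignier/pxmcmc | pxmcmc/utils.py | chebyshev2
-- ===== SOURCE A (Python) =====
-- def chebyshev2(X, order):
--     """
--     Calculates the Chebyshev polynomial of the second kind of the given order at point X.
--     Uses the recurrence relation
--             U_{k+1}(X) = 2XU_{k}(X) - U_{k-1}(X)
--             U_{1}(X) = 2X
--             U_{0}(X) = 1
--     """
--     if order < 0:
--         raise ValueError("order must be >= 0")
--     elif order == 0:
--         return 1
--     elif order == 1:
--         return 2 * X
--     else:
--         return 2 * X * chebyshev2(X, order - 1) - chebyshev2(X, order - 2)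
-- ===== SOURCE B (Python) =====
-- def chebyshev2(X, order):
--     if order < 0:
--         raise ValueError("order must be >= 0")
--     a, b = 1, 2 * X  # U_0, U_1
--     for _ in range(order):
--         a, b = b, 2 * X * b - a
--     return a
-- ===== Notes on version B (the rewrite author's own statement) =====
-- stated objective: faster
-- what changed: Replaced the binary tree recursion with an iterative bottom-up recurrence keeping only the last two values; intended as asymptotically faster (in a timing run A timed out at n=16 where B returned, so no ratio could be measured).
import Mathlib
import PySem

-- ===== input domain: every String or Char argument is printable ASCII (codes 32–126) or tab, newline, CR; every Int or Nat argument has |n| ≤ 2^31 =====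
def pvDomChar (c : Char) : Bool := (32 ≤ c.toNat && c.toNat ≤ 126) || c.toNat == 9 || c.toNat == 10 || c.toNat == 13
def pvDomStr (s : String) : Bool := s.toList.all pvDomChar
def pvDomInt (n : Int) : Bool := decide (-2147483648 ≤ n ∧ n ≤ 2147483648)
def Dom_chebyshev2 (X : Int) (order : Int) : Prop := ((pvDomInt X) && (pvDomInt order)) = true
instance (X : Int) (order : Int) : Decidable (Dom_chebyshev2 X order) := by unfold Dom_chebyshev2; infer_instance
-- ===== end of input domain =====

-- B replaces A's exponential double recursion by an iterative recurrence keeping the last two values; intended as asymptotically faster (a timing run saw A time out at n=16 where B returned; no ratio measurable).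


-- ===== PORT A =====
-- A's recursion, on the Nat value of order (Pre_ excludes the negative orders on which A raises)
def chebyshev2Rec (X : Int) : Nat → Int
  | 0 => 1
  | 1 => 2 * X
  | n + 2 => 2 * X * chebyshev2Rec X (n + 1) - chebyshev2Rec X n

def chebyshev2 (X : Int) (order : Int) : Int :=
  if order < 0 then 0 else chebyshev2Rec X order.toNat

-- ===== PORT B =====
def chebyshev2_alt (X : Int) (order : Int) : Int :=
  if order < 0 then 0
  else (((List.range order.toNat).foldl
          (fun (p : Int × Int) _ => (p.2, 2 * X * p.2 - p.1)) (1, 2 * X))).1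

-- ===== PRECONDITION & SPEC =====
-- A raises ValueError on order < 0; exactly those inputs are excluded.
def Pre_chebyshev2 (X : Int) (order : Int) : Prop := 0 ≤ order
instance (X : Int) (order : Int) : Decidable (Pre_chebyshev2 X order) := by unfold Pre_chebyshev2; infer_instance
def pvWitness_chebyshev2 : Int × Int := (2, 5)

def Spec_chebyshev2 (X : Int) (order : Int) (out : Int) : Prop := out = chebyshev2_alt X order
instance (X : Int) (order : Int) (out : Int) : Decidable (Spec_chebyshev2 X order out) := by unfold Spec_chebyshev2; infer_instance

-- ===== CLAIM =====
def Claim_equal_chebyshev2 : Prop := ∀ (X : Int) (order : Int), Dom_chebyshev2 X order → Pre_chebyshev2 X order → Spec_chebyshev2 X order (chebyshev2 X order)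

-- ===== LEMMAS AND PROOFS =====
-- loop invariant: after n iterations the pair holds (U_n, U_{n+1})
theorem cheb_fold_inv (X : Int) (n : Nat) :
    (List.range n).foldl (fun (p : Int × Int) _ => (p.2, 2 * X * p.2 - p.1)) (1, 2 * X)
      = (chebyshev2Rec X n, chebyshev2Rec X (n + 1)) := by
  induction n with
  | zero => simp [chebyshev2Rec]
  | succ k ih =>
      rw [List.range_succ, List.foldl_append, ih]
      simp [chebyshev2Rec]

-- ===== VERDICT =====
theorem chebyshev2_spec : Claim_equal_chebyshev2 := by
  intro X order _ hpre
  unfold Spec_chebyshev2 chebyshev2 chebyshev2_alt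
  have : ¬ order < 0 := not_lt.mpr hpre
  simp [this, cheb_fold_inv]
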